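-- pv_equiv track=rewrite | github.com/spiman9/Practice-for-the-best-c-plus-plus-python-codes | Accenture/addDistinctSubDuplicate.py | function
-- ===== SOURCE A (Python) =====
-- def function(a , b , c , d):
--     l = [a , b , c , d]
--     d = {}
--
--     for i in l:
--         if i not in d:
--             d[i] = 1
--         else:
--             d[i] += 1
--
--     sum = 0
--     sub = 0
--     for key in d.keys():
--         if d[key] != 1:
--             sub += key
--         else:
--             sum += key
--     return sum - sub
-- ===== SOURCE B (Python) =====
-- def function(a, b, c, d):
--     s = sorted([a, b, c, d])
--     total = 0
--     cur, cnt = s[0], 1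
--     for x in s[1:]:
--         if x == cur:
--             cnt += 1
--         else:
--             total += cur if cnt == 1 else -cur
--             cur, cnt = x, 1
--     return total + (cur if cnt == 1 else -cur)
-- ===== Notes on version B (the rewrite author's own statement) =====
-- stated objective: alternative
-- what changed: Replaces the hash-count dict and the second pass over its keys with sorting the four values and a single pass that groups maximal runs of equal elements, adding singleton runs and subtracting longer runs.
import Mathlib
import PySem

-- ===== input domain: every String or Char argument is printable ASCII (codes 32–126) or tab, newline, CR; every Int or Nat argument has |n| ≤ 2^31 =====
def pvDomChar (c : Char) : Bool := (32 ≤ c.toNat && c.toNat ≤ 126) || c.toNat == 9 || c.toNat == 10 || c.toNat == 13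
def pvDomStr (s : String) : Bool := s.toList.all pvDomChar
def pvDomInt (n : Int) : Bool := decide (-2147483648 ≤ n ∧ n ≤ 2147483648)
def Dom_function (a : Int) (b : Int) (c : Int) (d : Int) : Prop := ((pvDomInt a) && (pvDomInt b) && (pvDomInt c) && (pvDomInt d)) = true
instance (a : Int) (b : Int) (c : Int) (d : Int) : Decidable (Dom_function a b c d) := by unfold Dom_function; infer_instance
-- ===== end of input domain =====

-- B replaces A's dict counting with sort + one-pass run grouping (objective: alternative).

-- ===== PORT A =====
def function (a : Int) (b : Int) (c : Int) (d : Int) : Int :=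
  let l := [a, b, c, d]
  let dd : PySem.Dict Int Int :=
    l.foldl (fun dd i =>
      if ¬ dd.contains i then dd.insert i 1
      else dd.modify i 0 (· + 1)) PySem.Dict.empty
  let st : Int × Int :=
    dd.keys.foldl (fun (st : Int × Int) key =>
      if dd.getD key 0 ≠ 1 then (st.1, st.2 + key) else (st.1 + key, st.2)) (0, 0)
  st.1 - st.2

-- ===== PORT B =====
def function_alt (a : Int) (b : Int) (c : Int) (d : Int) : Int :=
  let s := PySem.List.sorted [a, b, c, d] (fun x => x) false
  match s with
  | [] => 0
  | x :: rest =>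
    let st : Int × Int × Int :=
      rest.foldl (fun (st : Int × Int × Int) y =>
        if y = st.2.1 then (st.1, st.2.1, st.2.2 + 1)
        else (st.1 + (if st.2.2 = 1 then st.2.1 else -st.2.1), y, 1)) (0, x, 1)
    st.1 + (if st.2.2 = 1 then st.2.1 else -st.2.1)

-- ===== PRECONDITION & SPEC =====
def Spec_function (a : Int) (b : Int) (c : Int) (d : Int) (out : Int) : Prop := out = function_alt a b c d
instance (a : Int) (b : Int) (c : Int) (d : Int) (out : Int) : Decidable (Spec_function a b c d out) := by unfold Spec_function; infer_instance

-- ===== CLAIM (what is proved, stated in full; the proofs are below) =====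
def Claim_equal_function : Prop := ∀ (a : Int) (b : Int) (c : Int) (d : Int), Dom_function a b c d → Spec_function a b c d (function a b c d)

-- ===== LEMMAS AND PROOFS =====

/-- The common specification: over the distinct values of `l`, add each value
occurring exactly once and subtract each value occurring more than once. -/
def sigSum (l : List Int) : Int :=
  ∑ v ∈ l.toFinset, (if l.count v = 1 then v else -v)

-- ---------- A side ----------

theorem stepA_eq_modify (dd : PySem.Dict Int Int) (i : Int) :
    (if ¬ dd.contains i then dd.insert i 1 else dd.modify i 0 (· + 1))
      = dd.modify i 0 (· + 1) := by
  by_cases h : dd.contains i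
  · simp [h]
  · rw [if_pos (by simp [h])]
    have hf : dd.items.find? (fun p => p.1 == i) = none := by
      rw [List.find?_eq_none]
      intro p hp
      simp only [PySem.Dict.contains, List.any_eq_true] at h
      push Not at h
      exact h p hp
    simp only [PySem.Dict.modify, PySem.Dict.getD, PySem.Dict.get?, hf,
      Option.map_none, Option.getD_none, zero_add]

theorem foldA_eq_counter (l : List Int) :
    l.foldl (fun dd i =>
      if ¬ dd.contains i then dd.insert i 1
      else dd.modify i 0 (· + 1)) PySem.Dict.empty = PySem.Dict.counter l := by
  rw [PySem.Dict.counter_eq_foldl]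
  exact PySem.List.foldl_congr_mem l _ _ _ (fun dd x hx => stepA_eq_modify dd x)

theorem sumA (dd : PySem.Dict Int Int) (ks : List Int) (t : Int × Int) :
    (ks.foldl (fun (st : Int × Int) key =>
      if dd.getD key 0 ≠ 1 then (st.1, st.2 + key) else (st.1 + key, st.2)) t).1
    - (ks.foldl (fun (st : Int × Int) key =>
      if dd.getD key 0 ≠ 1 then (st.1, st.2 + key) else (st.1 + key, st.2)) t).2
    = t.1 - t.2 + (ks.map (fun k => if dd.getD k 0 = 1 then k else -k)).sum := by
  induction ks generalizing t with
  | nil => simp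
  | cons k ks ih =>
    rw [List.foldl_cons, List.map_cons, List.sum_cons]
    by_cases h : dd.getD k 0 = 1
    · rw [if_neg (by simpa using h), if_pos h, ih]
      ring
    · rw [if_pos h, if_neg h, ih]
      ring

theorem function_eq_sigSum (a b c d : Int) :
    function a b c d = sigSum [a, b, c, d] := by
  show (let l := [a, b, c, d]
    let dd : PySem.Dict Int Int :=
      l.foldl (fun dd i =>
        if ¬ dd.contains i then dd.insert i 1
        else dd.modify i 0 (· + 1)) PySem.Dict.empty
    let st : Int × Int :=
      dd.keys.foldl (fun (st : Int × Int) key =>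
        if dd.getD key 0 ≠ 1 then (st.1, st.2 + key) else (st.1 + key, st.2)) (0, 0)
    st.1 - st.2) = sigSum [a, b, c, d]
  simp only [foldA_eq_counter]
  rw [sumA]
  rw [PySem.Dict.keys_counter]
  have hmap : (PySem.Set.ofList [a, b, c, d]).map
        (fun k => if (PySem.Dict.counter [a, b, c, d]).getD k 0 = 1 then k else -k)
      = (PySem.Set.ofList [a, b, c, d]).map
        (fun k => if ([a, b, c, d].count k : Int) = 1 then k else -k) := by
    refine List.map_congr_left ?_
    intro k _
    rw [PySem.Dict.getD_counter]
  rw [hmap]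
  have hfin : ([a, b, c, d] : List Int).toFinset = (PySem.Set.ofList [a, b, c, d]).toFinset := by
    ext v
    simp [PySem.Set.mem_ofList]
  have hsum : sigSum [a, b, c, d]
      = ((PySem.Set.ofList [a, b, c, d]).map
          (fun k => if ([a, b, c, d].count k : Nat) = 1 then k else -k)).sum := by
    rw [sigSum, hfin]
    exact List.sum_toFinset _ (PySem.Set.nodup_ofList _)
  rw [hsum]
  have : ∀ k : Int, (([a, b, c, d].count k : Int) = 1) ↔ (([a, b, c, d].count k : Nat) = 1) := by
    intro k; omega
  simp only [this]
  ring

-- ---------- B side ----------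

/-- Run-grouping recursion equivalent to B's fold-with-finalisation. -/
def grp (cur cnt : Int) : List Int → Int
  | [] => if cnt = 1 then cur else -cur
  | y :: ys =>
    if y = cur then grp cur (cnt + 1) ys
    else (if cnt = 1 then cur else -cur) + grp y 1 ys

theorem foldB_eq_grp (rest : List Int) (t cur cnt : Int) :
    (rest.foldl (fun (st : Int × Int × Int) y =>
        if y = st.2.1 then (st.1, st.2.1, st.2.2 + 1)
        else (st.1 + (if st.2.2 = 1 then st.2.1 else -st.2.1), y, 1)) (t, cur, cnt)).1
      + (if (rest.foldl (fun (st : Int × Int × Int) y =>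
        if y = st.2.1 then (st.1, st.2.1, st.2.2 + 1)
        else (st.1 + (if st.2.2 = 1 then st.2.1 else -st.2.1), y, 1)) (t, cur, cnt)).2.2 = 1
        then (rest.foldl (fun (st : Int × Int × Int) y =>
        if y = st.2.1 then (st.1, st.2.1, st.2.2 + 1)
        else (st.1 + (if st.2.2 = 1 then st.2.1 else -st.2.1), y, 1)) (t, cur, cnt)).2.1
        else -(rest.foldl (fun (st : Int × Int × Int) y =>
        if y = st.2.1 then (st.1, st.2.1, st.2.2 + 1)
        else (st.1 + (if st.2.2 = 1 then st.2.1 else -st.2.1), y, 1)) (t, cur, cnt)).2.1)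
      = t + grp cur cnt rest := by
  induction rest generalizing t cur cnt with
  | nil => simp [grp]
  | cons y ys ih =>
    rw [List.foldl_cons]
    simp only [show ((t, cur, cnt) : Int × Int × Int).2.1 = cur from rfl,
      show ((t, cur, cnt) : Int × Int × Int).2.2 = cnt from rfl,
      show ((t, cur, cnt) : Int × Int × Int).1 = t from rfl]
    by_cases h : y = cur
    · rw [if_pos h, grp, if_pos h]
      exact ih t cur (cnt + 1)
    · rw [if_neg h, grp, if_neg h]
      rw [ih]
      ring

theorem grp_sorted (l : List Int) (cur cnt : Int)
    (hs : (cur :: l).Pairwise (· ≤ ·)) :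
    grp cur cnt l = (if cnt + (l.count cur : Int) = 1 then cur else -cur)
      + ∑ v ∈ l.toFinset.erase cur, (if l.count v = 1 then v else -v) := by
  induction l generalizing cur cnt with
  | nil => simp [grp]
  | cons y ys ih =>
    by_cases h : y = cur
    · subst h
      have hs' : (y :: ys).Pairwise (· ≤ ·) := hs.tail
      rw [grp, if_pos rfl, ih y (cnt + 1) hs']
      have hcount : ((y :: ys).count y : Int) = (ys.count y : Int) + 1 := by
        simp [List.count_cons]
      have herase : (y :: ys).toFinset.erase y = ys.toFinset.erase y := by
        simp [List.toFinset_cons, Finset.erase_insert_eq_erase]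
      have hcong : ∑ v ∈ ys.toFinset.erase y, (if ys.count v = 1 then v else -v)
          = ∑ v ∈ (y :: ys).toFinset.erase y, (if (y :: ys).count v = 1 then v else -v) := by
        rw [herase]
        refine Finset.sum_congr rfl ?_
        intro v hv
        have hvy : y ≠ v := fun he => (Finset.ne_of_mem_erase hv) he.symm
        simp [List.count_cons, hvy]
      rw [hcong, hcount]
      congr 1
      apply if_congr ?_ rfl rfl
      omega
    · have hcy : cur ≤ y := (List.pairwise_cons.mp hs).1 y (by simp)
      have hlt : cur < y := lt_of_le_of_ne hcy (fun he => h he.symm)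
      have hnotin : cur ∉ y :: ys := by
        intro hmem
        rcases List.mem_cons.mp hmem with h1 | h2
        · exact h h1.symm
        · have := (List.pairwise_cons.mp hs.tail).1 cur h2
          omega
      have hcount0 : ((y :: ys).count cur : Int) = 0 := by
        simp [List.count_eq_zero_of_not_mem hnotin]
      have hs' : (y :: ys).Pairwise (· ≤ ·) := hs.tail
      rw [grp, if_neg h, ih y 1 hs', hcount0]
      have hynotin : y ∉ ys.toFinset.erase y := by simp
      have hcurnot : cur ∉ (y :: ys).toFinset := by simpa using hnotin
      have herase2 : (y :: ys).toFinset.erase cur = (y :: ys).toFinset :=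
        Finset.erase_eq_self.mpr hcurnot
      have hins : (y :: ys).toFinset = insert y (ys.toFinset.erase y) := by
        ext v
        by_cases hv : v = y <;> simp [hv]
      rw [herase2, hins, Finset.sum_insert hynotin]
      have hcy2 : (y :: ys).count y = ys.count y + 1 := by
        simp [List.count_cons]
      have hcong2 : ∑ v ∈ ys.toFinset.erase y, (if (y :: ys).count v = 1 then v else -v)
          = ∑ v ∈ ys.toFinset.erase y, (if ys.count v = 1 then v else -v) := by
        refine Finset.sum_congr rfl ?_
        intro v hv
        have hvy : y ≠ v := fun he => (Finset.ne_of_mem_erase hv) he.symm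
        simp [List.count_cons, hvy]
      rw [hcong2, hcy2]
      have hiff : ((1 : Int) + (ys.count y : Int) = 1) ↔ ((ys.count y + 1 : Nat) = 1) := by
        omega
      by_cases hc : (ys.count y + 1 : Nat) = 1
      · rw [if_pos (hiff.mpr hc), if_pos hc]
        ring
      · rw [if_neg (fun hx => hc (hiff.mp hx)), if_neg hc]
        ring

theorem sigSum_perm (l l' : List Int) (hp : l.Perm l') : sigSum l = sigSum l' := by
  have hfin : l.toFinset = l'.toFinset := by
    ext v
    simp [List.mem_toFinset, hp.mem_iff]
  rw [sigSum, sigSum, hfin]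
  refine Finset.sum_congr rfl ?_
  intro v _
  rw [hp.count_eq]

theorem function_alt_eq_sigSum (a b c d : Int) :
    function_alt a b c d = sigSum [a, b, c, d] := by
  have hperm := PySem.List.sorted_perm [a, b, c, d] (fun x => x) false
  have hpair := PySem.List.sorted_pairwise [a, b, c, d] (fun x : Int => x)
  rw [← sigSum_perm _ _ hperm]
  show (match PySem.List.sorted [a, b, c, d] (fun x => x) false with
    | [] => (0 : Int)
    | x :: rest =>
      let st : Int × Int × Int :=
        rest.foldl (fun (st : Int × Int × Int) y =>
          if y = st.2.1 then (st.1, st.2.1, st.2.2 + 1)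
          else (st.1 + (if st.2.2 = 1 then st.2.1 else -st.2.1), y, 1)) (0, x, 1)
      st.1 + (if st.2.2 = 1 then st.2.1 else -st.2.1))
    = sigSum (PySem.List.sorted [a, b, c, d] (fun x => x) false)
  rcases hsl : PySem.List.sorted [a, b, c, d] (fun x => x) false with _ | ⟨x, rest⟩
  · rw [hsl] at hperm
    exact absurd (hperm.length_eq) (by simp)
  · rw [hsl] at hperm hpair
    have hx := foldB_eq_grp rest 0 x 1
    simp only []
    rw [hx, grp_sorted rest x 1 hpair]
    -- assemble sigSum (x :: rest)
    have hins : (x :: rest).toFinset = insert x (rest.toFinset.erase x) := by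
      ext v
      by_cases hv : v = x <;> simp [hv]
    have hxnot : x ∉ rest.toFinset.erase x := by simp
    rw [sigSum, hins, Finset.sum_insert hxnot]
    have hcx : (x :: rest).count x = rest.count x + 1 := by
      simp [List.count_cons]
    have hcong : ∑ v ∈ rest.toFinset.erase x, (if (x :: rest).count v = 1 then v else -v)
        = ∑ v ∈ rest.toFinset.erase x, (if rest.count v = 1 then v else -v) := by
      refine Finset.sum_congr rfl ?_
      intro v hv
      have hvx : x ≠ v := fun he => (Finset.ne_of_mem_erase hv) he.symm
      simp [List.count_cons, hvx]
    rw [hcong, hcx]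
    have hiff : ((1 : Int) + (rest.count x : Int) = 1) ↔ ((rest.count x + 1 : Nat) = 1) := by
      omega
    by_cases hc : (rest.count x + 1 : Nat) = 1
    · rw [if_pos (hiff.mpr hc), if_pos hc]
      ring
    · rw [if_neg (fun hxx => hc (hiff.mp hxx)), if_neg hc]
      ring

-- ===== VERDICT (by name: the statement is the Claim_ definition above) =====
theorem function_spec : Claim_equal_function := by
  intro a b c d _
  show function a b c d = function_alt a b c d
  rw [function_eq_sigSum, function_alt_eq_sigSum]
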